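-- pv_equiv track=rewrite | github.com/ozayn/flashcards | apps/api/app/api/generation.py | _allocate_cards_per_text_chunk
-- ===== SOURCE A (Python) =====
-- _TEXT_CHUNK_MIN_CARDS = 1
--
-- _TEXT_CHUNK_MAX_CARDS = 8
--
-- def _allocate_cards_per_text_chunk(total: int, n_chunks: int) -> list[int]:
--     """Spread requested cards across chunks with per-chunk floor/ceiling."""
--     if n_chunks <= 0:
--         return []
--     total = max(1, total)
--     if total < n_chunks:
--         out = [0] * n_chunks
--         for i in range(total):
--             out[i % n_chunks] += 1
--         return out
--     base = max(
--         _TEXT_CHUNK_MIN_CARDS,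
--         min(_TEXT_CHUNK_MAX_CARDS, (total + n_chunks - 1) // n_chunks),
--     )
--     out = [base] * n_chunks
--     # Adjust toward total without leaving chunks empty
--     for _ in range(n_chunks * 20):
--         s = sum(out)
--         if s == total:
--             break
--         if s < total:
--             idx = min(range(n_chunks), key=lambda i: out[i] if out[i] < _TEXT_CHUNK_MAX_CARDS else 999)
--             if out[idx] >= _TEXT_CHUNK_MAX_CARDS:
--                 break
--             out[idx] += 1
--         else:
--             idx = max(range(n_chunks), key=lambda i: out[i] if out[i] > _TEXT_CHUNK_MIN_CARDS else -1)
--             if out[idx] <= _TEXT_CHUNK_MIN_CARDS: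
--                 break
--             out[idx] -= 1
--     return out
-- ===== SOURCE B (Python) =====
-- def _allocate_cards_per_text_chunk(total: int, n_chunks: int) -> list[int]:
--     """Closed-form balanced allocation: ceiling division plus arithmetic counts
--     of floor/ceiling chunks, instead of A's iterative adjustment loop."""
--     if n_chunks <= 0:
--         return []
--     t = max(1, total)
--     if t < n_chunks:
--         return [1] * t + [0] * (n_chunks - t)
--     c = (t + n_chunks - 1) // n_chunks  # ceiling of t / n_chunks
--     if c > 8:
--         return [8] * n_chunks
--     e = n_chunks * c - t  # number of chunks that get one fewer card
--     return [c - 1] * e + [c] * (n_chunks - e)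
-- ===== Notes on version B (the rewrite author's own statement) =====
-- stated objective: faster
-- what changed: Replaced A's up-to-20*n_chunks-iteration adjustment loop (each iteration summing the list and scanning it with argmin/argmax) by a closed-form allocation: ceiling division gives the base, and the number of chunks lowered by one is computed arithmetically, so the list is built directly.
import Mathlib
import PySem

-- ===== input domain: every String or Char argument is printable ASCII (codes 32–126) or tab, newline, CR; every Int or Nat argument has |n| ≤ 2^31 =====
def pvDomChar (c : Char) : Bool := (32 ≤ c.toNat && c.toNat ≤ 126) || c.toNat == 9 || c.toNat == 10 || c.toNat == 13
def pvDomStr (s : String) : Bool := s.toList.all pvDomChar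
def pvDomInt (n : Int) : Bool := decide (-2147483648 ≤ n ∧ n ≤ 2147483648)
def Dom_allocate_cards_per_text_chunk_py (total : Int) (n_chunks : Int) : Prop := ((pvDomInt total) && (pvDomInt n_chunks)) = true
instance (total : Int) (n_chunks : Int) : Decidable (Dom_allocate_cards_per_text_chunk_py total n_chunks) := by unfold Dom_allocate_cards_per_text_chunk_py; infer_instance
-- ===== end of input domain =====

-- B replaces A's iterative adjustment loop by a closed-form O(n_chunks) allocation;
-- equal return values are proved for all inputs (A is total).

-- ===== PORT A =====
-- lambdas 'out[i] if out[i] < 8 else 999' / 'out[i] if out[i] > 1 else -1' (out[i] read twice, as in Python)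
def pvKeyLow (out : List Int) (i : Nat) : Int :=
  if out.getD i 0 < 8 then out.getD i 0 else 999

def pvKeyHigh (out : List Int) (i : Nat) : Int :=
  if 1 < out.getD i 0 then out.getD i 0 else -1

-- the 'for _ in range(n_chunks * 20)' adjustment loop, fuel = remaining iterations
def pvAdjust (total : Int) (n : Nat) : Nat → List Int → List Int
  | 0, out => out
  | fuel+1, out =>
    let s := out.sum
    if s = total then out
    else if s < total then
      let idx := (List.range n).foldl (fun b i => if pvKeyLow out i < pvKeyLow out b then i else b) 0
      if 8 ≤ out.getD idx 0 then out
      else pvAdjust total n fuel (out.set idx (out.getD idx 0 + 1))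
    else
      let idx := (List.range n).foldl (fun b i => if pvKeyHigh out b < pvKeyHigh out i then i else b) 0
      if out.getD idx 0 ≤ 1 then out
      else pvAdjust total n fuel (out.set idx (out.getD idx 0 - 1))

def allocate_cards_per_text_chunk_py (total : Int) (n_chunks : Int) : List Int :=
  if n_chunks ≤ 0 then []
  else
    let total := max 1 total
    if total < n_chunks then
      (List.range total.toNat).foldl
        (fun out i =>
          let j := i % n_chunks.toNat
          out.set j (out.getD j 0 + 1))
        (List.replicate n_chunks.toNat 0)
    else
      let base := max 1 (min 8 (PySem.Int.floordiv (total + n_chunks - 1) n_chunks))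
      pvAdjust total n_chunks.toNat (n_chunks.toNat * 20) (List.replicate n_chunks.toNat base)

-- ===== PORT B =====
def allocate_cards_per_text_chunk_py_alt (total : Int) (n_chunks : Int) : List Int :=
  if n_chunks ≤ 0 then []
  else
    let t := max 1 total
    if t < n_chunks then
      List.replicate t.toNat 1 ++ List.replicate (n_chunks - t).toNat 0
    else
      let c := PySem.Int.floordiv (t + n_chunks - 1) n_chunks
      if 8 < c then List.replicate n_chunks.toNat 8
      else
        let e := n_chunks * c - t
        List.replicate e.toNat (c - 1) ++ List.replicate (n_chunks - e).toNat c

-- ===== PRECONDITION & SPEC =====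
def Spec_allocate_cards_per_text_chunk_py (total : Int) (n_chunks : Int) (out : List Int) : Prop := out = allocate_cards_per_text_chunk_py_alt total n_chunks
instance (total : Int) (n_chunks : Int) (out : List Int) : Decidable (Spec_allocate_cards_per_text_chunk_py total n_chunks out) := by unfold Spec_allocate_cards_per_text_chunk_py; infer_instance

-- ===== CLAIM (what is proved, stated in full; the proofs are below) =====
def Claim_equal_allocate_cards_per_text_chunk_py : Prop := ∀ (total : Int) (n_chunks : Int), Dom_allocate_cards_per_text_chunk_py total n_chunks → Spec_allocate_cards_per_text_chunk_py total n_chunks (allocate_cards_per_text_chunk_py total n_chunks)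

-- ===== LEMMAS AND PROOFS =====

-- two-block list: j copies of x then n-j copies of y
def pvSt (x y : Int) (n j : Nat) : List Int := List.replicate j x ++ List.replicate (n - j) y

lemma pvSt_zero (x y : Int) (n : Nat) : pvSt x y n 0 = List.replicate n y := by
  simp [pvSt]

lemma pvGetD_repl (a d : Int) (n i : Nat) :
    (List.replicate n a).getD i d = if i < n then a else d := by
  rw [List.getD_eq_getElem?_getD, List.getElem?_replicate]
  split <;> rfl

lemma pvSt_getD (x y : Int) (n j i : Nat) (hj : j ≤ n) :
    (pvSt x y n j).getD i 0 = if i < j then x else if i < n then y else 0 := by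
  unfold pvSt
  by_cases h1 : i < j
  · rw [List.getD_append _ _ _ _ (by rw [List.length_replicate]; omega),
      pvGetD_repl, if_pos h1, if_pos h1]
  · rw [List.getD_append_right _ _ _ _ (by rw [List.length_replicate]; omega),
      List.length_replicate, pvGetD_repl]
    by_cases h2 : i < n
    · rw [if_pos (by omega), if_neg h1, if_pos h2]
    · rw [if_neg (by omega), if_neg h1, if_neg h2]

lemma pvSt_sum (x y : Int) (n j : Nat) (hj : j ≤ n) :
    (pvSt x y n j).sum = (j : Int) * x + ((n : Int) - (j : Int)) * y := by
  rw [pvSt, List.sum_append, List.sum_replicate, List.sum_replicate, nsmul_eq_mul,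
    nsmul_eq_mul, Nat.cast_sub hj]

lemma pvSt_set (x y : Int) : ∀ j n, j < n → (pvSt x y n j).set j x = pvSt x y n (j + 1) := by
  intro j
  induction j with
  | zero =>
    intro n hn
    obtain ⟨m, rfl⟩ : ∃ m, n = m + 1 := ⟨n - 1, by omega⟩
    simp [pvSt, List.replicate_succ]
  | succ j ih =>
    intro n hn
    obtain ⟨m, rfl⟩ : ∃ m, n = m + 1 := ⟨n - 1, by omega⟩
    have h1 : pvSt x y (m + 1) (j + 1) = x :: pvSt x y m j := by
      simp [pvSt, List.replicate_succ, Nat.succ_sub_succ]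
    have h2 : pvSt x y (m + 1) (j + 2) = x :: pvSt x y m (j + 1) := by
      simp [pvSt, List.replicate_succ, Nat.succ_sub_succ]
    rw [h1, h2]
    show (x :: pvSt x y m j).set (j + 1) x = x :: pvSt x y m (j + 1)
    simp only [List.set]
    rw [ih m (by omega)]

-- the picking fold returns the accumulator or a list element
lemma pvFold_pick_mem (f : Nat → Nat → Nat) (hf : ∀ b i, f b i = b ∨ f b i = i) :
    ∀ (l : List Nat) (a : Nat), l.foldl f a = a ∨ l.foldl f a ∈ l := by
  intro l
  induction l with
  | nil => intro a; left; rfl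
  | cons x l ih =>
    intro a
    rw [List.foldl_cons]
    rcases ih (f a x) with h | h
    · rcases hf a x with h' | h'
      · exact Or.inl (h.trans h')
      · exact Or.inr (by rw [h, h']; exact List.mem_cons_self ..)
    · exact Or.inr (List.mem_cons_of_mem _ h)

-- max(range n, key): first index attaining the maximum
lemma pvArgmax (key : Nat → Int) (j : Nat)
    (hlt : ∀ i, i < j → key i < key j) (hle : ∀ i, key i ≤ key j) :
    ∀ n, j < n →
    (List.range n).foldl (fun b i => if key b < key i then i else b) 0 = j := by
  intro n hn
  induction n, hn using Nat.le_induction with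
  | base =>
    rw [List.range_succ, List.foldl_append]
    rcases Nat.eq_zero_or_pos j with hj0 | hj0
    · subst hj0; simp
    · have hb := pvFold_pick_mem (fun b i => if key b < key i then i else b)
        (fun b i => by dsimp only; split <;> simp) (List.range j) 0
      have hbj : (List.range j).foldl (fun b i => if key b < key i then i else b) 0 < j := by
        rcases hb with h | h
        · rw [h]; exact hj0
        · exact List.mem_range.mp h
      simp only [List.foldl_cons, List.foldl_nil]
      rw [if_pos (hlt _ hbj)]
  | succ n hn ih =>
    rw [List.range_succ, List.foldl_append, ih]
    simp only [List.foldl_cons, List.foldl_nil]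
    rw [if_neg (not_lt.mpr (hle n))]

-- min(range n, key): stays at 0 when nothing in range beats key 0
lemma pvArgmin_stay (key : Nat → Int) :
    ∀ n, (∀ i, i < n → ¬ key i < key 0) →
    (List.range n).foldl (fun b i => if key i < key b then i else b) 0 = 0 := by
  intro n
  induction n with
  | zero => intro _; rfl
  | succ m ih =>
    intro h
    rw [List.range_succ, List.foldl_append, ih (fun i hi => h i (by omega))]
    simp only [List.foldl_cons, List.foldl_nil]
    rw [if_neg (h m (by omega))]

-- one full run of the decrement phase: from state j down to state e
lemma pvAdjust_run (t : Int) (n : Nat) (c : Int) (e : Nat) (hen : e < n)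
    (ht : t = (n : Int) * c - e) (hc : 0 < e → 2 ≤ c) :
    ∀ d j fuel, j + d = e → d < fuel →
      pvAdjust t n fuel (pvSt (c - 1) c n j) = pvSt (c - 1) c n e := by
  intro d
  induction d with
  | zero =>
    intro j fuel hj hf
    obtain ⟨f, rfl⟩ : ∃ f, fuel = f + 1 := ⟨fuel - 1, by omega⟩
    have hje : j = e := by omega
    subst hje
    have hs : (pvSt (c - 1) c n j).sum = t := by
      rw [pvSt_sum _ _ _ _ (le_of_lt hen), ht]; ring
    simp only [pvAdjust]
    rw [if_pos hs]
  | succ d ihd =>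
    intro j fuel hj hf
    obtain ⟨f, rfl⟩ : ∃ f, fuel = f + 1 := ⟨fuel - 1, by omega⟩
    have hjn : j < n := by omega
    have hc2 : 2 ≤ c := hc (by omega)
    have hs : (pvSt (c - 1) c n j).sum = (n : Int) * c - j := by
      rw [pvSt_sum _ _ _ _ (le_of_lt hjn)]; ring
    have hsne : ¬ (pvSt (c - 1) c n j).sum = t := by
      rw [hs, ht]
      intro h
      have hje2 : (j : Int) = (e : Int) := by linarith
      have : j = e := by exact_mod_cast hje2
      omega
    have hsgt : ¬ (pvSt (c - 1) c n j).sum < t := by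
      rw [hs, ht]
      push_neg
      have : (j : Int) < (e : Int) := by exact_mod_cast (show j < e by omega)
      linarith
    have hKj : pvKeyHigh (pvSt (c - 1) c n j) j = c := by
      unfold pvKeyHigh
      rw [pvSt_getD _ _ _ _ _ (le_of_lt hjn), if_neg (lt_irrefl j), if_pos hjn,
        if_pos (show (1 : Int) < c by omega)]
    have hKlt : ∀ i, i < j →
        pvKeyHigh (pvSt (c - 1) c n j) i < pvKeyHigh (pvSt (c - 1) c n j) j := by
      intro i hi
      rw [hKj]
      unfold pvKeyHigh
      rw [pvSt_getD _ _ _ _ _ (le_of_lt hjn), if_pos hi]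
      split_ifs <;> omega
    have hKle : ∀ i, pvKeyHigh (pvSt (c - 1) c n j) i ≤ pvKeyHigh (pvSt (c - 1) c n j) j := by
      intro i
      rw [hKj]
      unfold pvKeyHigh
      rw [pvSt_getD _ _ _ _ _ (le_of_lt hjn)]
      split_ifs <;> omega
    have hidx := pvArgmax (pvKeyHigh (pvSt (c - 1) c n j)) j hKlt hKle n hjn
    have hgd : (pvSt (c - 1) c n j).getD j 0 = c := by
      rw [pvSt_getD _ _ _ _ _ (le_of_lt hjn), if_neg (lt_irrefl j), if_pos hjn]
    simp only [pvAdjust]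
    rw [if_neg hsne, if_neg hsgt, hidx, hgd, if_neg (show ¬ c ≤ 1 by omega),
      pvSt_set _ _ _ _ hjn]
    exact ihd (j + 1) f (by omega) (by omega)

-- the 'total < n_chunks' round-robin fill
lemma pvFill (n : Nat) : ∀ m, m ≤ n →
    (List.range m).foldl
      (fun out i => let j := i % n; out.set j (out.getD j 0 + 1))
      (List.replicate n 0) = pvSt 1 0 n m := by
  intro m
  induction m with
  | zero => intro _; rw [pvSt_zero]; rfl
  | succ m ih =>
    intro hm
    have hmn : m < n := by omega
    rw [List.range_succ, List.foldl_append, ih (by omega)]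
    simp only [List.foldl_cons, List.foldl_nil, Nat.mod_eq_of_lt hmn]
    rw [pvSt_getD _ _ _ _ _ (le_of_lt hmn), if_neg (lt_irrefl m), if_pos hmn]
    rw [show (0 : Int) + 1 = 1 from by norm_num, pvSt_set _ _ _ _ hmn]

-- ===== VERDICT (by name: the statement is the Claim_ definition above) =====
theorem allocate_cards_per_text_chunk_py_spec : Claim_equal_allocate_cards_per_text_chunk_py := by
  intro total n_chunks _
  unfold Spec_allocate_cards_per_text_chunk_py
  by_cases hn : n_chunks ≤ 0
  · simp [allocate_cards_per_text_chunk_py, allocate_cards_per_text_chunk_py_alt, hn]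
  · push_neg at hn
    simp only [allocate_cards_per_text_chunk_py, allocate_cards_per_text_chunk_py_alt,
      if_neg (not_le.mpr hn)]
    generalize hgen : max 1 total = t
    have ht1 : (1 : Int) ≤ t := by rw [← hgen]; exact le_max_left _ _
    obtain ⟨nN, hnN⟩ : ∃ m, n_chunks.toNat = m := ⟨_, rfl⟩
    rw [hnN]
    have hcast : (nN : Int) = n_chunks := by omega
    by_cases htn : t < n_chunks
    · rw [if_pos htn, if_pos htn]
      obtain ⟨tN, htN⟩ : ∃ m, t.toNat = m := ⟨_, rfl⟩
      rw [htN]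
      rw [pvFill nN tN (by omega), pvSt]
      have hcnt : (n_chunks - t).toNat = nN - tN := by omega
      rw [hcnt]
    · rw [if_neg htn, if_neg htn]
      have htn' : n_chunks ≤ t := not_lt.mp htn
      obtain ⟨c, hcdef⟩ : ∃ c, PySem.Int.floordiv (t + n_chunks - 1) n_chunks = c := ⟨_, rfl⟩
      rw [hcdef]
      have hb : c * n_chunks ≤ t + n_chunks - 1 ∧ t + n_chunks - 1 < (c + 1) * n_chunks :=
        (PySem.Int.floordiv_eq_iff_of_pos hn).mp hcdef
      have hexp : (c + 1) * n_chunks = c * n_chunks + n_chunks := by ring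
      have hcomm : n_chunks * c = c * n_chunks := mul_comm _ _
      have hc1 : (1 : Int) ≤ c := by
        by_contra h
        push_neg at h
        have h2 : (c + 1) * n_chunks ≤ 1 * n_chunks :=
          mul_le_mul_of_nonneg_right (by omega) hn.le
        linarith [hb.2]
      by_cases hc8 : 8 < c
      · rw [if_pos hc8]
        have hbase : max 1 (min 8 c) = (8 : Int) := by omega
        rw [hbase]
        have hnN1 : 1 ≤ nN := by omega
        obtain ⟨f, hfuel⟩ : ∃ f, nN * 20 = f + 1 := ⟨nN * 20 - 1, by omega⟩
        rw [hfuel]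
        have h9 : 9 * n_chunks ≤ c * n_chunks :=
          mul_le_mul_of_nonneg_right (by omega) hn.le
        have h8n : (nN : Int) * 8 < t := by linarith [hb.1]
        have hs : (List.replicate nN (8 : Int)).sum = (nN : Int) * 8 := by
          rw [List.sum_replicate, nsmul_eq_mul]
        have hK0 : pvKeyLow (List.replicate nN (8 : Int)) 0 = 999 := by
          unfold pvKeyLow
          rw [pvGetD_repl, if_pos (show 0 < nN by omega)]
          norm_num
        have hmin : ∀ i, i < nN →
            ¬ pvKeyLow (List.replicate nN (8 : Int)) i < pvKeyLow (List.replicate nN (8 : Int)) 0 := by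
          intro i hi
          rw [hK0]
          unfold pvKeyLow
          rw [pvGetD_repl, if_pos hi]
          norm_num
        have hidx := pvArgmin_stay (pvKeyLow (List.replicate nN (8 : Int))) nN hmin
        have hgd : (List.replicate nN (8 : Int)).getD 0 0 = 8 := by
          rw [pvGetD_repl, if_pos (show 0 < nN by omega)]
        simp only [pvAdjust]
        rw [hs, if_neg (ne_of_lt h8n), if_pos h8n, hidx, hgd,
          if_pos (le_refl (8 : Int))]
      · rw [if_neg hc8]
        push_neg at hc8
        have hbase : max 1 (min 8 c) = c := by omega
        rw [hbase]
        have h3 : t - 1 < c * n_chunks := by linarith [hb.2, hexp]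
        have h4 : t ≤ c * n_chunks := by
          have := Int.add_one_le_iff.mpr h3
          linarith
        have heZ0' : 0 ≤ n_chunks * c - t := by linarith [hcomm]
        have heZn' : n_chunks * c - t < n_chunks := by linarith [hb.1, hcomm]
        obtain ⟨E, hE⟩ : ∃ E, n_chunks * c - t = E := ⟨_, rfl⟩
        rw [hE]
        rw [hE] at heZ0' heZn'
        have hrun := pvAdjust_run t nN c E.toNat (by omega)
          (by
            rw [show ((E.toNat : Int)) = E from Int.toNat_of_nonneg heZ0', hcast]
            linarith [hE])
          (by
            intro hpos
            by_contra hcc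
            push_neg at hcc
            have hceq : c = 1 := by omega
            rw [hceq] at hE
            omega)
          E.toNat 0 (nN * 20) (by omega) (by omega)
        rw [← pvSt_zero (c - 1) c nN, hrun, pvSt]
        have hcnt : (n_chunks - E).toNat = nN - E.toNat := by omega
        rw [hcnt]
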